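-- pv_equiv track=rewrite | github.com/Bardhitoo/CSCI.603-Computational-Problem-Solving | Week 13/icemaze-stu_1.py | is_left
-- ===== SOURCE A (Python) =====
-- def is_left(i, j, maze):
--     """
--     Finds the left most value possible value where a person at coordinate x,y(row ,column)
--     can be
--
--     :param
--     int: i,j - row number and column number of a node whose left most movement
--     needs to be found
--     2d list : maze - Actual maze matrix
--
--     :return:
--     None if left movement is not possible
--     Tuple(y,x) - (column no, row no) if left movement is possible
--     """
--     check_maze = maze[i]
--     left = None
--     for items in range(len(check_maze) - 1, -1, -1):
--
--         if (items < j):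
--             if (check_maze[items] == "."):
--                 left = items
--             if (check_maze[items] == "*"):
--                 break
--
--     if left != None:
--         return (left, i)
--     else:
--         return None
-- ===== SOURCE B (Python) =====
-- def is_left(i, j, maze):
--     """Single forward pass: remember the first '.' seen, reset at every wall '*'."""
--     row = maze[i]
--     end = min(max(j, 0), len(row))
--     left = None
--     for k in range(end):
--         c = row[k]
--         if c == "*":
--             left = None
--         elif c == "." and left is None:
--             left = k
--     return (left, i) if left is not None else None
-- ===== Notes on version B (the rewrite author's own statement) =====
-- stated objective: simpler
-- what changed: Replaces A's backward scan (overwrite '.' candidates, break at the first wall) by a single forward pass over the first min(max(j,0),len(row)) cells that remembers the first '.' and resets it at each wall '*'.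
import Mathlib
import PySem

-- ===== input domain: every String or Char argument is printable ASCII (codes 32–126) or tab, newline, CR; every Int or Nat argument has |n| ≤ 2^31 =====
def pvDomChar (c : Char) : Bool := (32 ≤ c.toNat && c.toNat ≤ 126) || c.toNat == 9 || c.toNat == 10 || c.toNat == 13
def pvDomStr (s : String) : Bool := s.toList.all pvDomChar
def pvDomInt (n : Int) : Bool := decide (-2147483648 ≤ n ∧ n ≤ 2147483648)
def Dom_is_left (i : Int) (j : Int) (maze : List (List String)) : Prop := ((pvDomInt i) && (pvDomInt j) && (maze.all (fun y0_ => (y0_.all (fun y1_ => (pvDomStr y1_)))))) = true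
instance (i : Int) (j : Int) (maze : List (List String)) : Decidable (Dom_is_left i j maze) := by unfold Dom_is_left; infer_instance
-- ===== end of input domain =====

-- B replaces A's backward overwrite-and-break scan by a single forward pass (remember first '.', reset at '*'); objective: simpler.


-- ===== PORT A =====
-- A's loop: for items in range(len(check_maze)-1, -1, -1), with an early break on '*'
def isLeftGoA (check : List String) (j : Int) : List Int → Option Int → Option Int
  | [], left => left
  | k :: ks, left =>
    if k < j then
      match PySem.List.pyGet? check k with
      | none => left   -- unreachable: k is drawn from range(len(check)-1,-1,-1)
      | some c =>
        let left' := if c == "." then some k else left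
        if c == "*" then left' else isLeftGoA check j ks left'
    else isLeftGoA check j ks left

def is_left (i : Int) (j : Int) (maze : List (List String)) : Option (Int × Int) :=
  match PySem.List.pyGet? maze i with
  | none => none   -- Python raises IndexError here; excluded by Pre_
  | some check_maze =>
    match isLeftGoA check_maze j (PySem.List.pyRange ((check_maze.length : Int) - 1) (-1) (-1)) none with
    | some l => some (l, i)
    | none => none

-- ===== PORT B =====
def is_left_alt (i : Int) (j : Int) (maze : List (List String)) : Option (Int × Int) :=
  match PySem.List.pyGet? maze i with
  | none => none   -- Python raises IndexError here; excluded by Pre_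
  | some row =>
    let e := min (max j 0) (row.length : Int)
    match (PySem.List.pyRange 0 e 1).foldl (fun left k =>
        match PySem.List.pyGet? row k with
        | none => left   -- unreachable: k < e ≤ len(row)
        | some c =>
          if c == "*" then none
          else if c == "." && left == (none : Option Int) then some k
          else left) none with
    | some l => some (l, i)
    | none => none

-- ===== PRECONDITION & SPEC =====
-- Pre_ excludes exactly the inputs where maze[i] raises IndexError (i out of range).
def Pre_is_left (i : Int) (j : Int) (maze : List (List String)) : Prop :=
  PySem.Raise.InRange maze.length i
instance (i : Int) (j : Int) (maze : List (List String)) : Decidable (Pre_is_left i j maze) := by unfold Pre_is_left; infer_instance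
def pvWitness_is_left : Int × Int × List (List String) := (0, 1, [[".", "*"]])

def Spec_is_left (i : Int) (j : Int) (maze : List (List String)) (out : Option (Int × Int)) : Prop := out = is_left_alt i j maze
instance (i : Int) (j : Int) (maze : List (List String)) (out : Option (Int × Int)) : Decidable (Spec_is_left i j maze out) := by unfold Spec_is_left; infer_instance

-- ===== CLAIM (what is proved, stated in full; the proofs are below) =====
def Claim_equal_is_left : Prop := ∀ (i : Int) (j : Int) (maze : List (List String)), Dom_is_left i j maze → Pre_is_left i j maze → Spec_is_left i j maze (is_left i j maze)

-- ===== LEMMAS AND PROOFS =====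

-- Proof-side versions of the two loops, by recursion on how many cells are processed.
-- aLoop row m left: A's loop over indices m-1, m-2, …, 0 (no j-test, already below the clamp).
def aLoop (row : List String) : Nat → Option Int → Option Int
  | 0, left => left
  | m+1, left =>
    let c := row.getD m ""
    let left' := if c == "." then some (m : Int) else left
    if c == "*" then left' else aLoop row m left'

-- bLoop row m: B's fold over indices 0, 1, …, m-1.
def bLoop (row : List String) : Nat → Option Int
  | 0 => none
  | m+1 =>
    let c := row.getD m ""
    if c == "*" then none
    else if c == "." && bLoop row m == (none : Option Int) then some (m : Int)
    else bLoop row m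

theorem pyGet?_getD (row : List String) (m : Nat) (hm : m < row.length) :
    PySem.List.pyGet? row (m : Int) = some (row.getD m "") := by
  simp [List.getElem?_eq_getElem hm, List.getD_eq_getElem?_getD]

-- Key invariant: A's backward scan with accumulator equals B's forward scan, falling back to the accumulator.
theorem aLoop_eq_bLoop (row : List String) : ∀ (m : Nat) (left : Option Int),
    aLoop row m left = (match bLoop row m with | some k => some k | none => left) := by
  intro m
  induction m with
  | zero => intro left; simp [aLoop, bLoop]
  | succ m ih =>
    intro left
    simp only [aLoop, bLoop]
    generalize row.getD m "" = c
    by_cases hs : c == "*"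
    · have := eq_of_beq hs; subst this
      have h1 : (("*" : String) == ".") = false := by decide
      have h2 : (("*" : String) == "*") = true := by decide
      simp [h1]
    · rw [Bool.not_eq_true] at hs
      by_cases hd : c == "."
      · have := eq_of_beq hd; subst this
        have h3 : (("." : String) == "*") = false := by decide
        have h4 : (("." : String) == ".") = true := by decide
        simp only [h3, h4, Bool.true_and, if_false, Bool.false_eq_true, if_true]
        rw [ih (some (m : Int))]
        cases hb : bLoop row m <;> simp
      · rw [Bool.not_eq_true] at hd
        simp only [hs, hd, Bool.false_and, if_false, Bool.false_eq_true]
        exact ih left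

-- Phase 1: indices at or above the clamp e are skipped by A's j-test.
theorem goA_skip (row : List String) (j : Int) (e : Nat)
    (he : (e : Int) = min (max j 0) (row.length : Int)) :
    ∀ (n : Nat) (left : Option Int), e ≤ n → n ≤ row.length →
    isLeftGoA row j (PySem.List.pyRange ((n : Int) - 1) (-1) (-1)) left
      = isLeftGoA row j (PySem.List.pyRange ((e : Int) - 1) (-1) (-1)) left := by
  intro n
  induction n with
  | zero => intro left h1 _; interval_cases e; rfl
  | succ n ih =>
    intro left h1 h2
    by_cases hcond : e = n + 1
    · subst hcond; rfl
    · have hcast : ((n + 1 : Nat) : Int) - 1 = (n : Int) := by push_cast; ring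
      rw [PySem.List.pyRange_neg_one_cons (by omega), hcast]
      have hj : ¬ ((n : Int) < j) := by omega
      simp only [isLeftGoA, hj, if_false]
      exact ih left (by omega) (by omega)

-- Phase 2: below the clamp every index passes the j-test, giving aLoop.
theorem goA_act (row : List String) (j : Int) (e : Nat)
    (he : (e : Int) = min (max j 0) (row.length : Int)) :
    ∀ (m : Nat) (left : Option Int), m ≤ e → e ≤ row.length →
    isLeftGoA row j (PySem.List.pyRange ((m : Int) - 1) (-1) (-1)) left = aLoop row m left := by
  intro m
  induction m with
  | zero =>
    intro left _ _
    rw [PySem.List.pyRange_neg_one_eq_nil (by omega)]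
    rfl
  | succ m ih =>
    intro left h1 h2
    have hcast : ((m + 1 : Nat) : Int) - 1 = (m : Int) := by push_cast; ring
    rw [PySem.List.pyRange_neg_one_cons (by omega), hcast]
    have hj : (m : Int) < j := by omega
    have hget := pyGet?_getD row m (by omega)
    simp only [isLeftGoA, hj, if_true, hget, aLoop]
    generalize row.getD m "" = c
    by_cases hs : c == "*"
    · simp [hs]
    · rw [Bool.not_eq_true] at hs
      simp only [hs, if_false, Bool.false_eq_true]
      exact ih _ (by omega) h2

-- B's fold over range(0, e) equals bLoop at e.
theorem foldB_eq_bLoop (row : List String) (e : Nat) (he : e ≤ row.length) :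
    (PySem.List.pyRange 0 (e : Int) 1).foldl (fun left k =>
        match PySem.List.pyGet? row k with
        | none => left
        | some c =>
          if c == "*" then none
          else if c == "." && left == (none : Option Int) then some k
          else left) none = bLoop row e := by
  induction e with
  | zero => rw [PySem.List.pyRange_one_eq_nil (by omega)]; simp [bLoop]
  | succ m ih =>
    rw [show ((m + 1 : Nat) : Int) = (m : Int) + 1 by push_cast; ring,
        PySem.List.pyRange_one_succ_right (by omega), List.foldl_append, ih (by omega)]
    simp only [List.foldl_cons, List.foldl_nil]
    rw [pyGet?_getD row m (by omega)]
    simp only [bLoop]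

theorem clamp_exists (j : Int) (n : Nat) : ∃ e : Nat, (e : Int) = min (max j 0) (n : Int) ∧ e ≤ n := by
  refine ⟨(min (max j 0) (n : Int)).toNat, ?_, ?_⟩ <;> omega

-- ===== VERDICT (by name: the statement is the Claim_ definition above) =====
theorem is_left_spec : Claim_equal_is_left := by
  intro i j maze _ hpre
  unfold Pre_is_left at hpre
  unfold Spec_is_left is_left is_left_alt
  cases hrow : PySem.List.pyGet? maze i with
  | none => exact absurd hpre ((PySem.List.pyGet?_eq_none_iff maze i).mp hrow)
  | some row =>
    simp only []
    obtain ⟨e, he, hle⟩ := clamp_exists j row.length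
    rw [goA_skip row j e he row.length none hle (le_refl _),
        goA_act row j e he e none (le_refl _) hle, ← he,
        foldB_eq_bLoop row e hle, aLoop_eq_bLoop]
    cases bLoop row e <;> rfl
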